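-- pv_equiv track=rewrite | github.com/ianpstewart/Advent-of-Code | 4/D4P1.py | checkPhrase
-- ===== SOURCE A (Python) =====
-- from collections import defaultdict as defaultdict
--
-- def checkPhrase(line):
--     result = defaultdict(int)
--     words = line.split(" ")
--     for val in words:
--         val = val.rstrip()
--         result[val] += 1
--
--     for val in result.values():
--         if val > 1:
--             return 0
--     return 1
-- ===== SOURCE B (Python) =====
-- def checkPhrase(line):
--     words = sorted(w.rstrip() for w in line.split(" "))
--     for a, b in zip(words, words[1:]):
--         if a == b:
--             return 0
--     return 1
-- ===== Notes on version B (the rewrite author's own statement) =====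
-- stated objective: alternative
-- what changed: Replaces the defaultdict count-then-scan-values with sorting the rstripped words and checking consecutive pairs for equality.
import Mathlib
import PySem

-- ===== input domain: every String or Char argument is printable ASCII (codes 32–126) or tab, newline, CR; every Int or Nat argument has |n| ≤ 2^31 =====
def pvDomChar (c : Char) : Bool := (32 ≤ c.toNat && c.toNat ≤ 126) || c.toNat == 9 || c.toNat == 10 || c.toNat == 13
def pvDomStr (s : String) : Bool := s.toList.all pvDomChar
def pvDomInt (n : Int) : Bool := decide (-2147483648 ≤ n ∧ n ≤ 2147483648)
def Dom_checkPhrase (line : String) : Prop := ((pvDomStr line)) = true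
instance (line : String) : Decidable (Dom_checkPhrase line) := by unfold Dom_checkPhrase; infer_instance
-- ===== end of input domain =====

-- B replaces A's defaultdict count-then-scan with sort-then-adjacent-comparison (alternative decomposition, same behaviour).

-- ===== PORT A =====
-- 'for val in result.values(): if val > 1: return 0' then 'return 1'
def checkPhraseScanVals : List Int → Int
  | [] => 1
  | v :: rest => if v > 1 then 0 else checkPhraseScanVals rest

def checkPhrase (line : String) : Int :=
  -- line.split(" "): sep is the nonempty literal " ", so split? is always some
  let words := (PySem.Str.split? line " ").getD []
  let result := words.foldl (fun d w => d.modify (PySem.Str.rstrip w) 0 (· + 1))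
      (PySem.Dict.empty : PySem.Dict String Int)
  checkPhraseScanVals result.values

-- ===== PORT B =====
-- 'for a, b in zip(words, words[1:]): if a == b: return 0' then 'return 1'
def checkPhraseAdj : List String → Int
  | a :: b :: rest => if a = b then 0 else checkPhraseAdj (b :: rest)
  | _ => 1

def checkPhrase_alt (line : String) : Int :=
  let words := ((PySem.Str.split? line " ").getD []).map PySem.Str.rstrip
  checkPhraseAdj (PySem.List.sorted words (fun w => w) false)

-- ===== PRECONDITION & SPEC =====
def Spec_checkPhrase (line : String) (out : Int) : Prop := out = checkPhrase_alt line
instance (line : String) (out : Int) : Decidable (Spec_checkPhrase line out) := by unfold Spec_checkPhrase; infer_instance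

-- ===== CLAIM (what is proved, stated in full; the proofs are below) =====
def Claim_equal_checkPhrase : Prop := ∀ (line : String), Dom_checkPhrase line → Spec_checkPhrase line (checkPhrase line)

-- ===== LEMMAS AND PROOFS =====

theorem scanVals_eq (vs : List Int) :
    checkPhraseScanVals vs = if ∀ v ∈ vs, v ≤ 1 then 1 else 0 := by
  induction vs with
  | nil => simp [checkPhraseScanVals]
  | cons v rest ih =>
    simp only [checkPhraseScanVals]
    rw [ih]
    by_cases h : v > 1
    · rw [if_pos h, if_neg]
      intro hall
      have := hall v (List.mem_cons_self ..)
      omega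
    · rw [if_neg h]
      by_cases h2 : ∀ w ∈ rest, w ≤ 1
      · rw [if_pos h2, if_pos]
        intro w hw
        rcases List.mem_cons.mp hw with h3 | h3
        · subst h3; omega
        · exact h2 w h3
      · rw [if_neg h2, if_neg]
        intro hall
        exact h2 fun w hw => hall w (List.mem_cons_of_mem _ hw)

theorem adj_eq (l : List String) :
    checkPhraseAdj l = if List.IsChain (· ≠ ·) l then 1 else 0 := by
  induction l with
  | nil => simp [checkPhraseAdj]
  | cons a rest ih =>
    cases rest with
    | nil => simp [checkPhraseAdj]
    | cons b t =>
      simp only [checkPhraseAdj, List.isChain_cons_cons, ih]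
      by_cases hab : a = b
      · simp [hab]
      · simp [hab]

theorem isChain_lt_of_le_ne (l : List String)
    (h1 : List.IsChain (· ≤ ·) l) (h2 : List.IsChain (· ≠ ·) l) :
    List.IsChain (· < ·) l := by
  induction l with
  | nil => simp
  | cons a rest ih =>
    cases rest with
    | nil => simp
    | cons b t =>
      rw [List.isChain_cons_cons] at h1 h2 ⊢
      exact ⟨lt_of_le_of_ne h1.1 h2.1, ih h1.2 h2.2⟩

theorem isChain_ne_iff_nodup (l : List String) (hs : l.Pairwise (· ≤ ·)) :
    List.IsChain (· ≠ ·) l ↔ l.Nodup := by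
  constructor
  · intro hc
    have hlt : List.IsChain (· < ·) l := isChain_lt_of_le_ne l hs.isChain hc
    have : l.Pairwise (· < ·) := List.isChain_iff_pairwise.mp hlt
    exact this.imp fun h => ne_of_lt h
  · intro hn; exact hn.isChain

theorem nodup_scan_aux (xs : List String) :
    checkPhraseScanVals
      (List.foldl (fun d w => d.modify (PySem.Str.rstrip w) 0 (· + 1))
        (PySem.Dict.empty : PySem.Dict String Int) xs).values
      = if (xs.map PySem.Str.rstrip).Nodup then 1 else 0 := by
  have hfold : List.foldl (fun d w => d.modify (PySem.Str.rstrip w) 0 (· + 1))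
      (PySem.Dict.empty : PySem.Dict String Int) xs
      = PySem.Dict.counter (xs.map PySem.Str.rstrip) := by
    rw [PySem.Dict.counter_eq_foldl, List.foldl_map]
  rw [hfold]
  generalize xs.map PySem.Str.rstrip = ys
  have hvals : (PySem.Dict.counter ys).values
      = (PySem.Set.ofList ys).map (fun k => (List.count k ys : Int)) := by
    show ((PySem.Dict.counter ys).items).map Prod.snd = _
    rw [PySem.Dict.items_counter, List.map_map]
    rfl
  rw [hvals, scanVals_eq]
  by_cases hnd : ys.Nodup
  · rw [if_pos hnd, if_pos]
    intro v hv
    simp only [List.mem_map, PySem.Set.mem_ofList] at hv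
    obtain ⟨k, hk, rfl⟩ := hv
    have := List.nodup_iff_count_le_one.mp hnd k
    omega
  · rw [if_neg hnd, if_neg]
    intro hall
    apply hnd
    rw [List.nodup_iff_count_le_one]
    intro k
    by_cases hk : k ∈ ys
    · have := hall ((List.count k ys : Int)) (by
        simp only [List.mem_map, PySem.Set.mem_ofList]; exact ⟨k, hk, rfl⟩)
      omega
    · simp [List.count_eq_zero_of_not_mem hk]

theorem adj_sorted_aux (xs : List String) :
    checkPhraseAdj (PySem.List.sorted xs (fun w => w) false)
      = if xs.Nodup then 1 else 0 := by
  rw [adj_eq]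
  have hperm : (PySem.List.sorted xs (fun w => w) false).Perm xs :=
    PySem.List.sorted_perm xs (fun w => w) false
  have hpw : (PySem.List.sorted xs (fun w => w) false).Pairwise (· ≤ ·) := by
    simpa using PySem.List.sorted_pairwise xs (fun w => w)
  simp only [isChain_ne_iff_nodup _ hpw, hperm.nodup_iff]

-- ===== VERDICT (by name: the statement is the Claim_ definition above) =====
theorem checkPhrase_spec : Claim_equal_checkPhrase := by
  intro line _
  unfold Spec_checkPhrase
  show checkPhraseScanVals
      (List.foldl (fun d w => d.modify (PySem.Str.rstrip w) 0 (· + 1))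
        (PySem.Dict.empty : PySem.Dict String Int)
        ((PySem.Str.split? line " ").getD [])).values
    = checkPhraseAdj
        (PySem.List.sorted (((PySem.Str.split? line " ").getD []).map PySem.Str.rstrip)
          (fun w => w) false)
  rw [nodup_scan_aux, adj_sorted_aux]
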